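-- pv_equiv track=rewrite | github.com/harrisoneanthony/stack_2 | lecture/week_13/algo.py | helpfinder
-- ===== SOURCE A (Python) =====
-- def helpfinder(str):
--     new_arr = []
--     counth = 0
--     counte = 0
--     countl = 0
--     countp = 0
--     for i in str:
--         if i == "h":
--             while counth == 0:
--                 counth +=1
--                 new_arr.append(i)
--         if i == "e":
--             while counte == 0:
--                 counte += 1
--                 new_arr.append(i)
--         if i == "l":
--             while countl == 0:
--                 countl += 1
--                 new_arr.append(i)
--         if i == "p":
--             while countp == 0:
--                 countp += 1
--                 new_arr.append(i)
--     if new_arr == ['h','e','l','p']: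
--         return True
--     else:
--         return False
-- ===== SOURCE B (Python) =====
-- def helpfinder(str):
--     try:
--         return str.index("h") < str.index("e") < str.index("l") < str.index("p")
--     except ValueError:
--         return False
-- ===== Notes on version B (the rewrite author's own statement) =====
-- stated objective: simpler
-- what changed: Replaces the accumulating first-seen marker list built by a per-character scan with four direct str.index lookups and one chained comparison of the first-occurrence positions (missing letter -> ValueError -> False).
import Mathlib
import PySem

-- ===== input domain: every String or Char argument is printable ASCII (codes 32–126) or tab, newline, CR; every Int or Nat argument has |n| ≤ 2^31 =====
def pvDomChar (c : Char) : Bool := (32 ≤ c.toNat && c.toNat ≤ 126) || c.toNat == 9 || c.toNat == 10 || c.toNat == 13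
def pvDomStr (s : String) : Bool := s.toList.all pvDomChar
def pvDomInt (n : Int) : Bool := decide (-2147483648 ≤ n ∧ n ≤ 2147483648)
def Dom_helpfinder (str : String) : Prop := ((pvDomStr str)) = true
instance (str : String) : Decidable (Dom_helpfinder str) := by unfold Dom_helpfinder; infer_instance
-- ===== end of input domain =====

-- B replaces A's accumulating first-seen marker list with four direct index lookups
-- and one chained comparison of the first-occurrence positions (objective: simpler).

-- ===== PORT A =====
-- one step of A's for-loop: the four if/while blocks, in order, on state (new_arr, counth, counte, countl, countp)
def stepH (st : List Char × Nat × Nat × Nat × Nat) (i : Char) : List Char × Nat × Nat × Nat × Nat :=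
  if i = 'h' then
    (if st.2.1 = 0 then (st.1 ++ [i], st.2.1 + 1, st.2.2.1, st.2.2.2.1, st.2.2.2.2) else st)
  else st

def stepE (st : List Char × Nat × Nat × Nat × Nat) (i : Char) : List Char × Nat × Nat × Nat × Nat :=
  if i = 'e' then
    (if st.2.2.1 = 0 then (st.1 ++ [i], st.2.1, st.2.2.1 + 1, st.2.2.2.1, st.2.2.2.2) else st)
  else st

def stepL (st : List Char × Nat × Nat × Nat × Nat) (i : Char) : List Char × Nat × Nat × Nat × Nat :=
  if i = 'l' then
    (if st.2.2.2.1 = 0 then (st.1 ++ [i], st.2.1, st.2.2.1, st.2.2.2.1 + 1, st.2.2.2.2) else st)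
  else st

def stepP (st : List Char × Nat × Nat × Nat × Nat) (i : Char) : List Char × Nat × Nat × Nat × Nat :=
  if i = 'p' then
    (if st.2.2.2.2 = 0 then (st.1 ++ [i], st.2.1, st.2.2.1, st.2.2.2.1, st.2.2.2.2 + 1) else st)
  else st

def helpStep (st : List Char × Nat × Nat × Nat × Nat) (i : Char) : List Char × Nat × Nat × Nat × Nat :=
  stepP (stepL (stepE (stepH st i) i) i) i

def helpfinder (str : String) : Bool :=
  let st := str.toList.foldl helpStep ([], 0, 0, 0, 0)
  if st.1 = ['h', 'e', 'l', 'p'] then true else false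

-- ===== PORT B =====
-- str.index(c) is find with the ValueError (= -1) branch returning False, as Source B's try/except does
def helpfinder_alt (str : String) : Bool :=
  let ih := PySem.Str.find str "h"
  let ie := PySem.Str.find str "e"
  let il := PySem.Str.find str "l"
  let ip := PySem.Str.find str "p"
  if ih = -1 ∨ ie = -1 ∨ il = -1 ∨ ip = -1 then false
  else decide (ih < ie ∧ ie < il ∧ il < ip)

-- ===== PRECONDITION & SPEC =====
def Spec_helpfinder (str : String) (out : Bool) : Prop := out = helpfinder_alt str
instance (str : String) (out : Bool) : Decidable (Spec_helpfinder str out) := by unfold Spec_helpfinder; infer_instance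

-- ===== CLAIM (what is proved, stated in full; the proofs are below) =====
def Claim_equal_helpfinder : Prop := ∀ (str : String), Dom_helpfinder str → Spec_helpfinder str (helpfinder str)

-- ===== LEMMAS AND PROOFS =====

-- "the letters of `need`, in this order, all occur in cs with strictly increasing first indices"
def incIdx (cs : List Char) : List Char → Bool
  | [] => true
  | [n] => (PySem.List.index? cs n).isSome
  | n :: m :: ns =>
    match PySem.List.index? cs n, PySem.List.index? cs m with
    | some a, some b => decide (a < b) && incIdx cs (m :: ns)
    | _, _ => false

def helpTarget : List Char := ['h', 'e', 'l', 'p']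

def helpState : Nat → List Char × Nat × Nat × Nat × Nat
  | 0 => ([], 0, 0, 0, 0)
  | 1 => (['h'], 1, 0, 0, 0)
  | 2 => (['h', 'e'], 1, 1, 0, 0)
  | 3 => (['h', 'e', 'l'], 1, 1, 1, 0)
  | _ => (['h', 'e', 'l', 'p'], 1, 1, 1, 1)

lemma step_arr_append1 (f : List Char × Nat × Nat × Nat × Nat → Char → List Char × Nat × Nat × Nat × Nat)
    (hf : f = stepH ∨ f = stepE ∨ f = stepL ∨ f = stepP)
    (st : List Char × Nat × Nat × Nat × Nat) (i : Char) :
    ∃ u, (f st i).1 = st.1 ++ u := by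
  rcases hf with rfl | rfl | rfl | rfl <;>
    [unfold stepH; unfold stepE; unfold stepL; unfold stepP] <;>
    split_ifs <;> first | exact ⟨[i], rfl⟩ | exact ⟨[], by simp⟩

lemma helpStep_arr_append (st : List Char × Nat × Nat × Nat × Nat) (i : Char) :
    ∃ u, (helpStep st i).1 = st.1 ++ u := by
  obtain ⟨u1, h1⟩ := step_arr_append1 stepH (by tauto) st i
  obtain ⟨u2, h2⟩ := step_arr_append1 stepE (by tauto) (stepH st i) i
  obtain ⟨u3, h3⟩ := step_arr_append1 stepL (by tauto) (stepE (stepH st i) i) i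
  obtain ⟨u4, h4⟩ := step_arr_append1 stepP (by tauto) (stepL (stepE (stepH st i) i) i) i
  exact ⟨u1 ++ u2 ++ u3 ++ u4, by simp [helpStep, h4, h3, h2, h1]⟩

lemma foldl_arr_append (cs : List Char) (st : List Char × Nat × Nat × Nat × Nat) :
    ∃ u, (cs.foldl helpStep st).1 = st.1 ++ u := by
  induction cs generalizing st with
  | nil => exact ⟨[], by simp⟩
  | cons c cs ih =>
    obtain ⟨u, hu⟩ := helpStep_arr_append st c
    obtain ⟨t, ht⟩ := ih (helpStep st c)
    exact ⟨u ++ t, by simp [ht, hu]⟩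

lemma foldl_ne_of_not_prefix (cs : List Char) (st : List Char × Nat × Nat × Nat × Nat)
    (h : ¬ st.1 <+: helpTarget) : ¬ (cs.foldl helpStep st).1 = helpTarget := by
  obtain ⟨u, hu⟩ := foldl_arr_append cs st
  intro he
  exact h ⟨u, by rw [← hu, he]⟩

lemma incIdx_head_none {cs : List Char} {n : Char} (h : PySem.List.index? cs n = none)
    (ns : List Char) : incIdx cs (n :: ns) = false := by
  cases ns with
  | nil =>
    simp only [incIdx, h]
    rfl
  | cons a t =>
    simp only [incIdx, h]

-- prepending a char not in `need` shifts every first index by one, preserving the chain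
lemma incIdx_shift (need : List Char) (cs : List Char) (c : Char) (h : c ∉ need) :
    incIdx (c :: cs) need = incIdx cs need := by
  induction need with
  | nil => rfl
  | cons n ns ih =>
    have hcn : c ≠ n := by rintro rfl; exact h (by simp)
    cases ns with
    | nil =>
      rw [incIdx, incIdx, PySem.List.index?_cons_of_ne _ hcn]
      cases PySem.List.index? cs n <;> simp
    | cons m ms =>
      have hcm : c ≠ m := by rintro rfl; exact h (by simp)
      have hns : c ∉ m :: ms := fun hm => h (List.mem_cons_of_mem _ hm)
      rw [incIdx, incIdx, PySem.List.index?_cons_of_ne _ hcn,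
        PySem.List.index?_cons_of_ne _ hcm]
      cases PySem.List.index? cs n <;> cases PySem.List.index? cs m <;>
        simp [ih hns]

lemma incIdx_advance (ns : List Char) (cs : List Char) (c : Char) (h : c ∉ ns) :
    incIdx (c :: cs) (c :: ns) = incIdx cs ns := by
  cases ns with
  | nil => simp [incIdx]
  | cons m ms =>
    have hcm : c ≠ m := by rintro rfl; exact h (by simp)
    rw [incIdx, PySem.List.index?_cons_self, PySem.List.index?_cons_of_ne _ hcm]
    cases hm : PySem.List.index? cs m with
    | none => simp [incIdx_head_none (n := m) hm]
    | some b => simp [incIdx_shift _ cs c h]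

-- a needed letter occurring at position 0 while it is not the first needed letter kills the chain
lemma incIdx_fail (ns : List Char) (n : Char) (cs : List Char) (c : Char) (h : c ∈ ns) :
    incIdx (c :: cs) (n :: ns) = false := by
  induction ns generalizing n with
  | nil => simp at h
  | cons m ms ih =>
    rw [incIdx]
    by_cases hcm : c = m
    · subst hcm
      rw [PySem.List.index?_cons_self]
      cases PySem.List.index? (c :: cs) n <;> simp
    · have hms : c ∈ ms := by
        rcases List.mem_cons.1 h with h' | h'
        · exact absurd h' hcm
        · exact h'
      cases PySem.List.index? (c :: cs) n <;>
        cases PySem.List.index? (c :: cs) m <;> simp [ih m hms]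

-- fail case of the main induction: a wrong letter was appended, and the chain is broken
lemma help_fail (cs : List Char) (st : List Char × Nat × Nat × Nat × Nat)
    (k : Nat) (c : Char) (h1 : ¬ st.1 <+: helpTarget)
    (h2 : incIdx (c :: cs) (helpTarget.drop k) = false) :
    ((cs.foldl helpStep st).1 = helpTarget) ↔ incIdx (c :: cs) (helpTarget.drop k) = true := by
  rw [h2]
  simp only [Bool.false_eq_true, iff_false]
  exact foldl_ne_of_not_prefix cs st h1

lemma help_main (cs : List Char) (k : Nat) (hk : k ≤ 4) :
    ((cs.foldl helpStep (helpState k)).1 = helpTarget) ↔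
      incIdx cs (helpTarget.drop k) = true := by
  induction cs generalizing k with
  | nil =>
    interval_cases k <;> simp [helpState, helpTarget, incIdx, PySem.List.index?]
  | cons c cs ih =>
    rw [List.foldl_cons]
    by_cases hh : c = 'h'
    · subst hh
      interval_cases k
      · rw [show helpStep (helpState 0) 'h' = helpState 1 by decide, ih 1 (by omega),
          show helpTarget.drop 0 = 'h' :: helpTarget.drop 1 from rfl,
          incIdx_advance _ _ _ (by decide)]
      · rw [show helpStep (helpState 1) 'h' = helpState 1 by decide, ih 1 (by omega),
          incIdx_shift _ _ _ (by decide)]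
      · rw [show helpStep (helpState 2) 'h' = helpState 2 by decide, ih 2 (by omega),
          incIdx_shift _ _ _ (by decide)]
      · rw [show helpStep (helpState 3) 'h' = helpState 3 by decide, ih 3 (by omega),
          incIdx_shift _ _ _ (by decide)]
      · rw [show helpStep (helpState 4) 'h' = helpState 4 by decide, ih 4 (by omega),
          incIdx_shift _ _ _ (by decide)]
    by_cases he : c = 'e'
    · subst he
      interval_cases k
      · exact help_fail _ _ 0 'e' (by decide)
          (by rw [show helpTarget.drop 0 = 'h' :: ['e','l','p'] from rfl]
              exact incIdx_fail _ _ _ _ (by decide))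
      · rw [show helpStep (helpState 1) 'e' = helpState 2 by decide, ih 2 (by omega),
          show helpTarget.drop 1 = 'e' :: helpTarget.drop 2 from rfl,
          incIdx_advance _ _ _ (by decide)]
      · rw [show helpStep (helpState 2) 'e' = helpState 2 by decide, ih 2 (by omega),
          incIdx_shift _ _ _ (by decide)]
      · rw [show helpStep (helpState 3) 'e' = helpState 3 by decide, ih 3 (by omega),
          incIdx_shift _ _ _ (by decide)]
      · rw [show helpStep (helpState 4) 'e' = helpState 4 by decide, ih 4 (by omega),
          incIdx_shift _ _ _ (by decide)]
    by_cases hl : c = 'l'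
    · subst hl
      interval_cases k
      · exact help_fail _ _ 0 'l' (by decide)
          (by rw [show helpTarget.drop 0 = 'h' :: ['e','l','p'] from rfl]
              exact incIdx_fail _ _ _ _ (by decide))
      · exact help_fail _ _ 1 'l' (by decide)
          (by rw [show helpTarget.drop 1 = 'e' :: ['l','p'] from rfl]
              exact incIdx_fail _ _ _ _ (by decide))
      · rw [show helpStep (helpState 2) 'l' = helpState 3 by decide, ih 3 (by omega),
          show helpTarget.drop 2 = 'l' :: helpTarget.drop 3 from rfl,
          incIdx_advance _ _ _ (by decide)]
      · rw [show helpStep (helpState 3) 'l' = helpState 3 by decide, ih 3 (by omega),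
          incIdx_shift _ _ _ (by decide)]
      · rw [show helpStep (helpState 4) 'l' = helpState 4 by decide, ih 4 (by omega),
          incIdx_shift _ _ _ (by decide)]
    by_cases hp : c = 'p'
    · subst hp
      interval_cases k
      · exact help_fail _ _ 0 'p' (by decide)
          (by rw [show helpTarget.drop 0 = 'h' :: ['e','l','p'] from rfl]
              exact incIdx_fail _ _ _ _ (by decide))
      · exact help_fail _ _ 1 'p' (by decide)
          (by rw [show helpTarget.drop 1 = 'e' :: ['l','p'] from rfl]
              exact incIdx_fail _ _ _ _ (by decide))
      · exact help_fail _ _ 2 'p' (by decide)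
          (by rw [show helpTarget.drop 2 = 'l' :: ['p'] from rfl]
              exact incIdx_fail _ _ _ _ (by decide))
      · rw [show helpStep (helpState 3) 'p' = helpState 4 by decide, ih 4 (by omega),
          show helpTarget.drop 3 = 'p' :: helpTarget.drop 4 from rfl,
          incIdx_advance _ _ _ (by decide)]
      · rw [show helpStep (helpState 4) 'p' = helpState 4 by decide, ih 4 (by omega),
          incIdx_shift _ _ _ (by decide)]
    -- c is none of the four letters: the state is unchanged and every first index shifts
    · have hstep : helpStep (helpState k) c = helpState k := by
        simp [helpStep, stepH, stepE, stepL, stepP, hh, he, hl, hp]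
      rw [hstep, ih k hk, incIdx_shift _ _ _ ?_]
      intro hc
      interval_cases k <;> simp [helpTarget] at hc <;> tauto

-- find on a one-character pattern is exactly list index?
lemma find_singleton (l : List Char) (c : Char) :
    PySem.Chars.find l [c] =
      match PySem.List.index? l c with
      | none => -1
      | some k => (k : Int) := by
  cases h : PySem.List.index? l c with
  | none =>
    have hmem : c ∉ l := (PySem.List.index?_eq_none_iff _ _).1 h
    have : ¬ [c] <:+: l := by
      intro ⟨s, t, hst⟩
      exact hmem (by rw [← hst]; simp)
    simpa using (PySem.Chars.find_eq_neg_one_iff _ _).2 this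
  | some k =>
    obtain ⟨hk, hget, hmin⟩ := PySem.List.getElem_of_index?_eq_some h
    have hmem : c ∈ l := by rw [← hget]; exact List.getElem_mem hk
    have hinf : [c] <:+: l := by
      obtain ⟨s, t, hst⟩ := List.append_of_mem hmem
      exact ⟨s, t, by rw [hst]; simp⟩
    have hnn : 0 ≤ PySem.Chars.find l [c] := (PySem.Chars.find_nonneg_iff _ _).2 hinf
    obtain ⟨hpre, hleast⟩ := PySem.Chars.find_spec hnn
    set f := (PySem.Chars.find l [c]).toNat with hf
    have hdropPre : ∀ j : Nat, ([c] <+: l.drop j) ↔ l[j]? = some c := by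
      intro j
      rw [← List.head?_drop]
      constructor
      · intro ⟨t, ht⟩
        rw [← ht]; rfl
      · intro hj
        cases hd : l.drop j with
        | nil => rw [hd] at hj; simp at hj
        | cons a t =>
          rw [hd] at hj
          simp at hj
          exact ⟨t, by simp [hj]⟩
    have hfc : l[f]? = some c := (hdropPre f).1 hpre
    have hkc : l[k]? = some c := by rw [List.getElem?_eq_getElem hk, hget]
    have hfk : f = k := by
      by_contra hne
      rcases Nat.lt_or_ge f k with hlt | hge
      · have hfl : f < l.length := by
          by_contra hge'
          rw [List.getElem?_eq_none (by omega)] at hfc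
          exact absurd hfc (by simp)
        have := hmin f hlt
        rw [List.getElem?_eq_getElem hfl] at hfc
        exact this (by injection hfc)
      · have hkf : k < f := by omega
        exact hleast k hkf ((hdropPre k).2 hkc)
    rw [show PySem.Chars.find l [c] = (f : Int) by rw [hf, Int.toNat_of_nonneg hnn], hfk]

lemma alt_eq_incIdx (s : String) : helpfinder_alt s = incIdx s.toList helpTarget := by
  unfold helpfinder_alt
  simp only [PySem.Str.find_eq]
  simp only [show ("h" : String).toList = ['h'] from rfl, show ("e" : String).toList = ['e'] from rfl,
    show ("l" : String).toList = ['l'] from rfl, show ("p" : String).toList = ['p'] from rfl,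
    find_singleton]
  rcases h1 : List.idxOf? 'h' s.toList with _ | a <;>
    rcases h2 : List.idxOf? 'e' s.toList with _ | b <;>
      rcases h3 : List.idxOf? 'l' s.toList with _ | c <;>
        rcases h4 : List.idxOf? 'p' s.toList with _ | d <;>
          simp [incIdx, helpTarget, h1, h2, h3, h4]

-- ===== VERDICT (by name: the statement is the Claim_ definition above) =====
theorem helpfinder_spec : Claim_equal_helpfinder := by
  intro str _
  unfold Spec_helpfinder
  rw [alt_eq_incIdx, Bool.eq_iff_iff]
  have hA : helpfinder str = true ↔
      (str.toList.foldl helpStep (helpState 0)).1 = helpTarget := by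
    simp [helpfinder, helpState, helpTarget]
  rw [hA]
  exact help_main str.toList 0 (by omega)
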